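-- pv_equiv track=rewrite | github.com/xinpw8/pokefirered-native | tools/map_data_to_c.py | format_u16_words
-- ===== SOURCE A (Python) =====
-- def format_u16_words(words: list[int]) -> list[str]:
--     row = []
--     formatted = []
--     for idx, word in enumerate(words, start=1):
--         row.append(f"0x{word:04X}")
--         if idx % 12 == 0:
--             formatted.append(", ".join(row) + ",")
--             row = []
--     if row:
--         formatted.append(", ".join(row) + ",")
--     return formatted
-- ===== SOURCE B (Python) =====
-- def format_u16_words(words: list[int]) -> list[str]:
--     fw = [f"0x{w:04X}" for w in words]
--     out = []
--     i = 0
--     while i < len(fw):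
--         out.append(", ".join(fw[i:i+12]) + ",")
--         i += 12
--     return out
-- ===== Notes on version B (the rewrite author's own statement) =====
-- stated objective: alternative
-- what changed: Replaced the single-pass enumerate loop with a modulo-12 counter, row accumulator and trailing flush by a map-then-chunk structure: format all words first, then repeatedly slice off 12-element chunks and join each.
import Mathlib
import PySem

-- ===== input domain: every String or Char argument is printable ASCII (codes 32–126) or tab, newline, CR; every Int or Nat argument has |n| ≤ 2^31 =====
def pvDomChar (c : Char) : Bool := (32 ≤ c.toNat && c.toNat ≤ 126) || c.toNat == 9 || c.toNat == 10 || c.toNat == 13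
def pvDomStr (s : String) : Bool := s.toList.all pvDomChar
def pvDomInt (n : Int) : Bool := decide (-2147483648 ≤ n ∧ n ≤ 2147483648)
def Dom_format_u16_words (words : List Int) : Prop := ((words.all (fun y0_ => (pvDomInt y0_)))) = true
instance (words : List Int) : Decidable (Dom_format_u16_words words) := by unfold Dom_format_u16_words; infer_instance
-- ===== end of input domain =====

-- B replaces A's modulo-12 counter + trailing flush with map-then-chunk-by-slicing (objective: alternative decomposition, same cost).

-- shared helper: Python's f"0x{w:04X}" (uppercase hex, zero-padded to total width 4 including a '-' sign)
def pvHexDig (n : Nat) : Char := if n < 10 then Char.ofNat (48 + n) else Char.ofNat (55 + n)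

def pvHexRep (n : Nat) : List Char :=
  if _h : n < 16 then [pvHexDig n]
  else pvHexRep (n / 16) ++ [pvHexDig (n % 16)]
  decreasing_by omega

def pvFmt04X (w : Int) : String :=
  if w < 0 then
    let ds := pvHexRep (-w).toNat
    "0x-" ++ String.ofList (List.replicate (3 - ds.length) '0' ++ ds)
  else
    let ds := pvHexRep w.toNat
    "0x" ++ String.ofList (List.replicate (4 - ds.length) '0' ++ ds)

-- ===== PORT A =====
-- for idx, word in enumerate(words, start=1): append to row; flush every 12th; trailing flush
def formatA_go : List Int → Nat → List String → List String → List String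
  | [], _, row, formatted =>
      if row.isEmpty then formatted
      else formatted ++ [String.intercalate ", " row ++ ","]
  | w :: ws, idx, row, formatted =>
      let row' := row ++ [pvFmt04X w]
      if idx % 12 = 0 then
        formatA_go ws (idx + 1) [] (formatted ++ [String.intercalate ", " row' ++ ","])
      else
        formatA_go ws (idx + 1) row' formatted

def format_u16_words (words : List Int) : List String :=
  formatA_go words 1 [] []

-- ===== PORT B =====
-- fw = [fmt(w) for w in words]; i = 0; while i < len(fw): out.append(join(fw[i:i+12]) + ","); i += 12
def formatB_go (fw : List String) (i : Nat) (out : List String) : List String :=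
  if i < fw.length then
    formatB_go fw (i + 12)
      (out ++ [String.intercalate ", " (PySem.List.slice fw (some (i : Int)) (some ((i : Int) + 12))) ++ ","])
  else out
  termination_by fw.length - i

def format_u16_words_alt (words : List Int) : List String :=
  formatB_go (words.map pvFmt04X) 0 []

-- ===== PRECONDITION & SPEC =====
def Spec_format_u16_words (words : List Int) (out : List String) : Prop := out = format_u16_words_alt words
instance (words : List Int) (out : List String) : Decidable (Spec_format_u16_words words out) := by unfold Spec_format_u16_words; infer_instance

-- ===== CLAIM (what is proved, stated in full; the proofs are below) =====
def Claim_equal_format_u16_words : Prop := ∀ (words : List Int), Dom_format_u16_words words → Spec_format_u16_words words (format_u16_words words)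

-- ===== LEMMAS AND PROOFS =====

-- canonical chunking (proof-only middle ground between the two loops)
def pvChunks (fw : List String) : List String :=
  if fw.isEmpty then []
  else (String.intercalate ", " (fw.take 12) ++ ",") :: pvChunks (fw.drop 12)
  termination_by fw.length
  decreasing_by
    rename_i h
    have h0 : 0 < fw.length := List.length_pos_of_ne_nil (by simpa [List.isEmpty_iff] using h)
    simp [List.length_drop]; omega

theorem pvChunks_unfold (fw : List String) :
    pvChunks fw = if fw.isEmpty then []
      else (String.intercalate ", " (fw.take 12) ++ ",") :: pvChunks (fw.drop 12) := by
  rw [pvChunks.eq_def]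

theorem formatB_go_eq (fw : List String) : ∀ (n i : Nat), fw.length - i ≤ n →
    ∀ (out : List String), formatB_go fw i out = out ++ pvChunks (fw.drop i) := by
  intro n
  induction n with
  | zero =>
      intro i hle out
      rw [formatB_go.eq_def, if_neg (by omega), pvChunks_unfold,
          if_pos (by simp [List.isEmpty_iff, List.drop_eq_nil_iff]; omega)]
      simp
  | succ n ih =>
      intro i hle out
      rw [formatB_go.eq_def]
      by_cases h : i < fw.length
      · rw [if_pos h, ih (i + 12) (by omega)]
        have hsl : PySem.List.slice fw (some (i : Int)) (some ((i : Int) + 12))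
            = (fw.drop i).take 12 := by
          have := PySem.List.slice_natCast_add (xs := fw) (j := i) (n := 12)
          simpa using this
        rw [hsl, pvChunks_unfold (fw.drop i),
            if_neg (by simp [List.isEmpty_iff, List.drop_eq_nil_iff]; omega)]
        simp [List.drop_drop]
      · rw [if_neg h, pvChunks_unfold,
            if_pos (by simp [List.isEmpty_iff, List.drop_eq_nil_iff]; omega)]
        simp

theorem formatA_go_eq (ws : List Int) :
    ∀ (idx : Nat) (row formatted : List String),
      1 ≤ idx → row.length = (idx - 1) % 12 →
      formatA_go ws idx row formatted = formatted ++ pvChunks (row ++ ws.map pvFmt04X) := by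
  induction ws with
  | nil =>
      intro idx row formatted h1 hlen
      simp only [formatA_go, List.map_nil, List.append_nil]
      by_cases hr : row.isEmpty
      · simp [List.isEmpty_iff] at hr
        simp [hr, pvChunks_unfold]
      · rw [if_neg hr, pvChunks_unfold, if_neg hr]
        have hlt : row.length < 12 := by omega
        rw [List.take_of_length_le (by omega), List.drop_eq_nil_of_le (by omega)]
        simp [pvChunks_unfold]
  | cons w ws ih =>
      intro idx row formatted h1 hlen
      simp only [formatA_go]
      by_cases h12 : idx % 12 = 0
      · rw [if_pos h12]
        have hlen' : row.length = 11 := by omega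
        rw [ih (idx + 1) [] _ (by omega) (by simp; omega)]
        have hkey : pvChunks (row ++ List.map pvFmt04X (w :: ws))
            = (String.intercalate ", " (row ++ [pvFmt04X w]) ++ ",") :: pvChunks (ws.map pvFmt04X) := by
          rw [pvChunks_unfold]
          have hne : ¬ (row ++ List.map pvFmt04X (w :: ws)).isEmpty := by simp
          rw [if_neg hne]
          have harr : row ++ List.map pvFmt04X (w :: ws) = (row ++ [pvFmt04X w]) ++ ws.map pvFmt04X := by
            simp
          rw [harr, List.take_append_of_le_length (by simp [hlen']),
              List.take_of_length_le (by simp [hlen']),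
              List.drop_append_of_le_length (by simp [hlen']),
              List.drop_eq_nil_of_le (by simp [hlen'])]
          simp
        rw [hkey]
        simp
      · rw [if_neg h12]
        rw [ih (idx + 1) (row ++ [pvFmt04X w]) formatted (by omega) (by simp; omega)]
        simp

-- ===== VERDICT (by name: the statement is the Claim_ definition above) =====
theorem format_u16_words_spec : Claim_equal_format_u16_words := by
  intro words _
  show format_u16_words words = format_u16_words_alt words
  rw [format_u16_words, format_u16_words_alt,
      formatB_go_eq (words.map pvFmt04X) (words.map pvFmt04X).length 0 (by omega) [],
      formatA_go_eq words 1 [] [] (by omega) (by simp)]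
  simp
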